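-- pv_equiv track=rewrite | github.com/66deded/NSKeyword_tool | demo.py | check_consecutive_single_slash
-- ===== SOURCE A (Python) =====
-- def check_consecutive_single_slash(input_string):
--     parts = input_string.split('/')
--     if len(parts) < 3:
--         return False
--     for i in range(len(parts) - 2):
--         if len(parts[i]) == 1 and len(parts[i + 1]) == 1 and len(parts[i + 2]) == 1:
--             return True
--     return False
-- ===== SOURCE B (Python) =====
-- def check_consecutive_single_slash(input_string):
--     run = 0
--     for part in input_string.split('/'):
--         if len(part) == 1:
--             run += 1
--             if run == 3:
--                 return True
--         else:
--             run = 0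
--     return False
-- ===== Notes on version B (the rewrite author's own statement) =====
-- stated objective: simpler
-- what changed: Replaced the indexed 3-wide window scan (with an explicit len<3 guard) by a single pass over the parts that maintains a run counter of consecutive single-character parts, returning True when it reaches 3.
import Mathlib
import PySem

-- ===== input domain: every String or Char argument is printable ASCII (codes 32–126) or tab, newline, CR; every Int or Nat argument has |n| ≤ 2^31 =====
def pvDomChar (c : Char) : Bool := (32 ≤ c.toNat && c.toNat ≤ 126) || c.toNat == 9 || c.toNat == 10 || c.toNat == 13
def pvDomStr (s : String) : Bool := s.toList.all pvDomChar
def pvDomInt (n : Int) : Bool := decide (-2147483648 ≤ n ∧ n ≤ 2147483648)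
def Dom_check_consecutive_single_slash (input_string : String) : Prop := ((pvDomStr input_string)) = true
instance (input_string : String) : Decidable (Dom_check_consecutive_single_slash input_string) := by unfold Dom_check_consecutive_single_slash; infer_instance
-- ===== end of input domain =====

-- B replaces A's indexed 3-wide window scan (with its len<3 guard) by a one-pass run counter; objective: simpler.

-- ===== PORT A =====
-- the for-loop over range(len(parts) - 2) with early 'return True' becomes .any over the
-- same range; indices i, i+1, i+2 are always in range, so pyGetD with a default is exact here
def check_consecutive_single_slash (input_string : String) : Bool :=
  match PySem.Str.split? input_string "/" with
  | none => false        -- unreachable: the separator "/" is nonempty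
  | some parts =>
    if parts.length < 3 then false
    else
      (PySem.List.pyRange 0 ((parts.length : Int) - 2) 1).any (fun i =>
        decide (PySem.Str.len (PySem.List.pyGetD parts i "") = 1) &&
        decide (PySem.Str.len (PySem.List.pyGetD parts (i + 1) "") = 1) &&
        decide (PySem.Str.len (PySem.List.pyGetD parts (i + 2) "") = 1))

-- ===== PORT B =====
-- one pass with a run counter of consecutive single-character parts
def bLoop : List String → Nat → Bool
  | [], _ => false
  | part :: rest, run =>
    if PySem.Str.len part = 1 then
      if run + 1 = 3 then true else bLoop rest (run + 1)
    else bLoop rest 0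

def check_consecutive_single_slash_alt (input_string : String) : Bool :=
  match PySem.Str.split? input_string "/" with
  | none => false        -- unreachable: the separator "/" is nonempty
  | some parts => bLoop parts 0

-- ===== PRECONDITION & SPEC =====
def Spec_check_consecutive_single_slash (input_string : String) (out : Bool) : Prop := out = check_consecutive_single_slash_alt input_string
instance (input_string : String) (out : Bool) : Decidable (Spec_check_consecutive_single_slash input_string out) := by unfold Spec_check_consecutive_single_slash; infer_instance

-- ===== CLAIM (what is proved, stated in full; the proofs are below) =====
def Claim_equal_check_consecutive_single_slash : Prop := ∀ (input_string : String), Dom_check_consecutive_single_slash input_string → Spec_check_consecutive_single_slash input_string (check_consecutive_single_slash input_string)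

-- ===== LEMMAS AND PROOFS =====

-- proof-only helpers: a structural characterisation "some window of three consecutive
-- single-character parts exists", to which both loops are reduced
def single (s : String) : Bool := decide (PySem.Str.len s = 1)

def p1 : List String → Bool
  | [] => false
  | a :: _ => single a

def p2 : List String → Bool
  | [] => false
  | a :: t => single a && p1 t

def p3 : List String → Bool
  | [] => false
  | a :: t => single a && p2 t

def triple : List String → Bool
  | [] => false
  | a :: t => p3 (a :: t) || triple t

theorem single_true {s : String} (h : PySem.Str.len s = 1) : single s = true := by
  unfold single; rw [h]; decide

theorem single_false {s : String} (h : ¬ PySem.Str.len s = 1) : single s = false := by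
  unfold single; exact decide_eq_false h

theorem triple_short (l : List String) (h : l.length < 3) : triple l = false := by
  match l, h with
  | [], _ => rfl
  | [a], _ => simp [triple, p3, p2]
  | [a, b], _ => simp [triple, p3, p2, p1]

theorem triple_cons (a : String) (t : List String) : triple (a :: t) = (p3 (a :: t) || triple t) := rfl
theorem p3_cons (a : String) (t : List String) : p3 (a :: t) = (single a && p2 t) := rfl
theorem p2_cons (a : String) (t : List String) : p2 (a :: t) = (single a && p1 t) := rfl
theorem p1_cons (a : String) (t : List String) : p1 (a :: t) = single a := rfl

theorem p2_p1 (t : List String) : p2 t = true → p1 t = true := by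
  cases t with
  | nil => simp [p2]
  | cons b t' => simp only [p2_cons, p1_cons, Bool.and_eq_true]; exact fun h => h.1

theorem bLoop_eq (l : List String) :
    bLoop l 0 = triple l ∧ bLoop l 1 = (triple l || p2 l) ∧ bLoop l 2 = (triple l || p1 l) := by
  induction l with
  | nil => simp [bLoop, triple, p2, p1]
  | cons a t ih =>
    obtain ⟨ih0, ih1, ih2⟩ := ih
    by_cases hs : PySem.Str.len a = 1
    · have s1 := single_true hs
      refine ⟨?_, ?_, ?_⟩
      · simp only [bLoop, if_pos hs, show ¬(0 + 1 = 3) by decide, if_false, triple_cons,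
          p3_cons, s1, Bool.true_and, ih1]
        cases triple t <;> cases p2 t <;> rfl
      · simp only [bLoop, if_pos hs, show ¬(1 + 1 = 3) by decide, if_false, triple_cons,
          p3_cons, p2_cons, s1, Bool.true_and, ih2]
        by_cases hp2 : p2 t = true
        · rw [hp2, p2_p1 t hp2]
          cases triple t <;> rfl
        · rw [Bool.not_eq_true] at hp2
          rw [hp2]
          cases triple t <;> cases p1 t <;> rfl
      · simp only [bLoop, if_pos hs, show (2 + 1 = 3) from rfl, if_true, triple_cons,
          p3_cons, p1_cons, s1, Bool.or_true]
    · have s1 := single_false hs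
      refine ⟨?_, ?_, ?_⟩ <;>
        simp only [bLoop, if_neg hs, triple_cons, p3_cons, p2_cons, p1_cons, s1,
          Bool.false_and, Bool.false_or, Bool.or_false, ih0]

theorem anyWin (l : List String) (i : Nat) :
    ((PySem.List.pyRange (i : Int) ((l.length : Int) - 2) 1).any (fun j =>
        decide (PySem.Str.len (PySem.List.pyGetD l j "") = 1) &&
        decide (PySem.Str.len (PySem.List.pyGetD l (j + 1) "") = 1) &&
        decide (PySem.Str.len (PySem.List.pyGetD l (j + 2) "") = 1))) = triple (l.drop i) := by
  by_cases h : i < l.length - 2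
  · have h0 : i < l.length := by omega
    have h1 : i + 1 < l.length := by omega
    have h2 : i + 2 < l.length := by omega
    have hd0 : l.drop i = l[i] :: l.drop (i + 1) := (List.getElem_cons_drop h0).symm
    have hd1 : l.drop (i + 1) = l[i + 1] :: l.drop (i + 2) := (List.getElem_cons_drop h1).symm
    have hd2 : l.drop (i + 2) = l[i + 2] :: l.drop (i + 3) := (List.getElem_cons_drop h2).symm
    have g0 : PySem.List.pyGetD l (i : Int) "" = l[i] := by
      rw [PySem.List.pyGetD_natCast]; exact List.getD_eq_getElem l "" h0
    have g1 : PySem.List.pyGetD l ((i : Int) + 1) "" = l[i + 1] := by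
      rw [show ((i : Int) + 1) = ((i + 1 : Nat) : Int) by push_cast; ring,
        PySem.List.pyGetD_natCast]
      exact List.getD_eq_getElem l "" h1
    have g2 : PySem.List.pyGetD l ((i : Int) + 2) "" = l[i + 2] := by
      rw [show ((i : Int) + 2) = ((i + 2 : Nat) : Int) by push_cast; ring,
        PySem.List.pyGetD_natCast]
      exact List.getD_eq_getElem l "" h2
    have hcons : PySem.List.pyRange (i : Int) ((l.length : Int) - 2) 1
        = (i : Int) :: PySem.List.pyRange ((i : Int) + 1) ((l.length : Int) - 2) 1 :=
      PySem.List.pyRange_one_cons (by omega)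
    have ih := anyWin l (i + 1)
    rw [show ((i + 1 : Nat) : Int) = ((i : Int) + 1) by push_cast; ring] at ih
    rw [hcons, List.any_cons, ih, g0, g1, g2, hd0, triple_cons, p3_cons]
    have hp2 : p2 (l.drop (i + 1)) = (single l[i + 1] && single l[i + 2]) := by
      rw [hd1, p2_cons, hd2, p1_cons]
    rw [hp2]
    simp only [single, Bool.and_assoc]
  · have hnil : PySem.List.pyRange (i : Int) ((l.length : Int) - 2) 1 = [] :=
      PySem.List.pyRange_one_eq_nil (by omega)
    rw [hnil]
    have : (l.drop i).length < 3 := by simp; omega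
    rw [triple_short _ this]
    rfl
termination_by l.length - i
decreasing_by omega

-- ===== VERDICT (by name: the statement is the Claim_ definition above) =====
theorem check_consecutive_single_slash_spec : Claim_equal_check_consecutive_single_slash := by
  intro s _
  unfold Spec_check_consecutive_single_slash check_consecutive_single_slash check_consecutive_single_slash_alt
  cases hsp : PySem.Str.split? s "/" with
  | none => rfl
  | some parts =>
    rw [show (match some parts with | none => false | some ps => bLoop ps 0) = bLoop parts 0 from rfl,
      (bLoop_eq parts).1]
    show (if parts.length < 3 then false else _) = triple parts
    by_cases h : parts.length < 3
    · rw [if_pos h, triple_short parts h]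
    · rw [if_neg h]
      have := anyWin parts 0
      rw [Nat.cast_zero, List.drop_zero] at this
      exact this
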